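-- pv_equiv track=rewrite | github.com/pratiksha-pai/leethub | 0490-the-maze/0490-the-maze.py | hasPath
-- ===== SOURCE A (Python) =====
-- from typing import List
--
-- def hasPath(maze: List[List[int]], src: List[int], dest: List[int]) -> bool:
--
--     seen = set()
--     dirs = [[-1, 0], [1, 0], [0, -1], [0, 1]]
--
--     def dfs(node):
--         if node == dest:
--             return True
--
--         if tuple(node) in seen:
--             return False
--
--
--         seen.add(tuple(node))
--
--         for dx, dy in dirs:
--             x, y = node
--             while 0 <= x+dx < len(maze) and 0 <= y+dy < len(maze[0]) and maze[x+dx][y+dy] == 0: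
--                 x += dx
--                 y += dy
--             if dfs([x, y]):
--                 return True
--         return False
--
--     return dfs(src)
-- ===== SOURCE B (Python) =====
-- from typing import List
--
-- def hasPath(maze: List[List[int]], src: List[int], dest: List[int]) -> bool:
--     # Iterative depth-first search with an explicit stack of frames
--     # (no recursion, so no RecursionError on large mazes).
--     if src == dest:
--         return True
--     x0, y0 = src
--     dirs = [(-1, 0), (1, 0), (0, -1), (0, 1)]
--     seen = set()
--     stack = [[(x0, y0)]]          # each frame: cells still to try at that level
--     while stack:
--         frame = stack[-1]
--         if not frame:
--             stack.pop()
--             continue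
--         x, y = frame.pop(0)
--         if [x, y] == dest:
--             return True
--         if (x, y) in seen:
--             continue
--         seen.add((x, y))
--         succs = []
--         for dx, dy in dirs:
--             nx, ny = x, y
--             while 0 <= nx + dx < len(maze) and 0 <= ny + dy < len(maze[0]) and maze[nx + dx][ny + dy] == 0:
--                 nx += dx
--                 ny += dy
--             succs.append((nx, ny))
--         stack.append(succs)
--     return False
-- ===== Notes on version B (the rewrite author's own statement) =====
-- stated objective: alternative
-- what changed: A's recursive DFS (implicit call stack, recursion into each rolled-to stop) is replaced by an iterative search loop over an explicit stack of frames, so B performs no recursion at all (no RecursionError on large mazes) while visiting the same stopping cells.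
-- outside the precondition, e.g. on hasPath([[1, 1], [1]], [0, 0], [1, 1]): A returns False, B returns False
import Mathlib
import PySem

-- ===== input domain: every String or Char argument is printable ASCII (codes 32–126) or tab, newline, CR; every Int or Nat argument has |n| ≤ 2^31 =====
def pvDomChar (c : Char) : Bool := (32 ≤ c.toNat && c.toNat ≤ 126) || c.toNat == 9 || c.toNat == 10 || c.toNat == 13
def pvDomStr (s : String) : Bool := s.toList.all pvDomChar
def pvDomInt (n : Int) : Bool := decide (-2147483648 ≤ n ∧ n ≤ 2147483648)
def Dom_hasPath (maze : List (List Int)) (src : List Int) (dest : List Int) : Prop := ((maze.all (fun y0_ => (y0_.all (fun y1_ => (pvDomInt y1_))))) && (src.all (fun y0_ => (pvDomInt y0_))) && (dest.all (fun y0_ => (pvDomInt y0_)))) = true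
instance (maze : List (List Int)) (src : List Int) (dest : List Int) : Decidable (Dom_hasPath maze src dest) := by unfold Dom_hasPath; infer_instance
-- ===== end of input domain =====

-- B re-implements A's recursive DFS as an iterative explicit-stack search loop (no recursion);
-- return value only, same results on all admitted inputs.

-- ===== PORT A =====
-- shared with PORT B: both Pythons contain the IDENTICAL inner `while` rolling loop;
-- the fuel (maze.length + row length + 2) strictly exceeds the number of steps the
-- Python loop can make, so the fueled version is exact.
def pvRoll (maze : List (List Int)) (dx dy : Int) : Nat → Int → Int → Int × Int
  | 0, x, y => (x, y)
  | f+1, x, y =>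
    if 0 ≤ x + dx ∧ x + dx < (maze.length : Int) ∧ 0 ≤ y + dy ∧ y + dy < ((maze.headI).length : Int)
        ∧ (maze.getD (x + dx).toNat []).getD (y + dy).toNat 1 = 0 then
      pvRoll maze dx dy f (x + dx) (y + dy)
    else (x, y)

-- `x, y = node` (ValueError, i.e. none, unless node has exactly two elements)
def pvPair : List Int → Option (Int × Int)
  | [x, y] => some (x, y)
  | _ => none

-- A's `dfs` with the mutable `seen` set threaded through; fuel only totalizes the
-- recursion (the fuel used in `hasPath` is provably never exhausted).
mutual
def dfsA (maze : List (List Int)) (dest : List Int) : Nat → List Int → Finset (Int × Int) → Bool × Finset (Int × Int)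
  | 0, _, seen => (false, seen)
  | f+1, node, seen =>
    if node = dest then (true, seen)
    else
      match pvPair node with
      | none => (false, seen)
      | some (x, y) =>
        if (x, y) ∈ seen then (false, seen)
        else tryDirsA maze dest f [(-1, 0), (1, 0), (0, -1), (0, 1)] x y (insert (x, y) seen)
termination_by f _ _ => (f, 0)

def tryDirsA (maze : List (List Int)) (dest : List Int) : Nat → List (Int × Int) → Int → Int → Finset (Int × Int) → Bool × Finset (Int × Int)
  | _, [], _, _, seen => (false, seen)
  | f, (dx, dy) :: ds, x, y, seen =>
    let s := pvRoll maze dx dy (maze.length + (maze.headI).length + 2) x y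
    let r := dfsA maze dest f [s.1, s.2] seen
    if r.1 then (true, r.2) else tryDirsA maze dest f ds x y r.2
termination_by f ds _ _ _ => (f, ds.length)
end

def hasPath (maze : List (List Int)) (src : List Int) (dest : List Int) : Bool :=
  (dfsA maze dest (maze.length * (maze.headI).length + 3) src ∅).1

-- ===== PORT B =====
-- the iterative search loop of Source B: stack of frames, each frame the cells still
-- to try at that level; fuel totalizes the while-loop, never exhausted in hasPath_alt.
def machineB (maze : List (List Int)) (dest : List Int) : Nat → List (List (Int × Int)) → Finset (Int × Int) → Bool
  | 0, _, _ => false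
  | _+1, [], _ => false
  | f+1, [] :: rest, seen => machineB maze dest f rest seen
  | f+1, ((x, y) :: fr) :: rest, seen =>
    if [x, y] = dest then true
    else if (x, y) ∈ seen then machineB maze dest f (fr :: rest) seen
    else
      let succs := [((-1 : Int), (0 : Int)), (1, 0), (0, -1), (0, 1)].map
        (fun d => pvRoll maze d.1 d.2 (maze.length + (maze.headI).length + 2) x y)
      machineB maze dest f (succs :: fr :: rest) (insert (x, y) seen)

def hasPath_alt (maze : List (List Int)) (src : List Int) (dest : List Int) : Bool :=
  if src = dest then true
  else
    match pvPair src with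
    | none => false
    | some (x0, y0) =>
      machineB maze dest (5 * (maze.length * (maze.headI).length + 1) + 5) [[(x0, y0)]] ∅

-- ===== PRECONDITION & SPEC =====
-- Pre_ excludes (a) src not of length 2 (unless src == dest), where A raises ValueError,
-- and (b) ragged mazes (a row shorter than row 0), where A can raise IndexError while
-- rolling; rectangularity is the closed-form guard (on some ragged mazes the ball never
-- reaches the short row and A happens to return — see the cite).
def Pre_hasPath (maze : List (List Int)) (src : List Int) (dest : List Int) : Prop :=
  (src = dest ∨ src.length = 2) ∧ ∀ row ∈ maze, row.length = (maze.headI).length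
instance (maze : List (List Int)) (src : List Int) (dest : List Int) : Decidable (Pre_hasPath maze src dest) := by unfold Pre_hasPath; infer_instance

def pvWitness_hasPath : List (List Int) × List Int × List Int := ([[0, 0], [0, 0]], [0, 0], [1, 1])

def Spec_hasPath (maze : List (List Int)) (src : List Int) (dest : List Int) (out : Bool) : Prop := out = hasPath_alt maze src dest
instance (maze : List (List Int)) (src : List Int) (dest : List Int) (out : Bool) : Decidable (Spec_hasPath maze src dest out) := by unfold Spec_hasPath; infer_instance

-- ===== CLAIM (what is proved, stated in full; the proofs are below) =====
def Claim_equal_hasPath : Prop := ∀ (maze : List (List Int)) (src : List Int) (dest : List Int), Dom_hasPath maze src dest → Pre_hasPath maze src dest → Spec_hasPath maze src dest (hasPath maze src dest)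

-- ===== LEMMAS AND PROOFS =====

-- the finite universe of cells a search can ever mark: the grid (as Int pairs)
def pvGrid (maze : List (List Int)) : Finset (Int × Int) :=
  (Finset.range maze.length ×ˢ Finset.range (maze.headI).length).image
    (fun p => ((p.1 : Int), (p.2 : Int)))

theorem mem_pvGrid (maze : List (List Int)) (x y : Int) :
    (x, y) ∈ pvGrid maze ↔ 0 ≤ x ∧ x < (maze.length : Int) ∧ 0 ≤ y ∧ y < ((maze.headI).length : Int) := by
  simp only [pvGrid, Finset.mem_image, Finset.mem_product, Finset.mem_range, Prod.exists]
  constructor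
  · rintro ⟨a, b, ⟨ha, hb⟩, h⟩
    obtain ⟨hx, hy⟩ := Prod.mk.injEq .. ▸ h
    subst hx; subst hy
    refine ⟨by positivity, ?_, by positivity, ?_⟩ <;> exact_mod_cast by omega
  · rintro ⟨hx0, hxm, hy0, hyn⟩
    refine ⟨x.toNat, y.toNat, ⟨by omega, by omega⟩, ?_⟩
    simp only [Prod.mk.injEq]
    omega

theorem pvGrid_card (maze : List (List Int)) :
    (pvGrid maze).card ≤ maze.length * (maze.headI).length := by
  calc (pvGrid maze).card ≤ (Finset.range maze.length ×ˢ Finset.range (maze.headI).length).card :=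
        Finset.card_image_le
    _ = maze.length * (maze.headI).length := by
        simp [Finset.card_product]

theorem pvRoll_mem (maze : List (List Int)) (dx dy : Int) :
    ∀ (f : Nat) (x y : Int), pvRoll maze dx dy f x y = (x, y) ∨ pvRoll maze dx dy f x y ∈ pvGrid maze := by
  intro f
  induction f with
  | zero => intro x y; left; rfl
  | succ f ih =>
    intro x y
    simp only [pvRoll]
    split
    · rename_i hcond
      rcases ih (x + dx) (y + dy) with h | h
      · right; rw [h, mem_pvGrid]; exact ⟨hcond.1, hcond.2.1, hcond.2.2.1, hcond.2.2.2.1⟩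
      · right; exact h
    · left; rfl

-- seen only grows
theorem tryDirsA_grow_of (maze : List (List Int)) (dest : List Int) (f : Nat)
    (h : ∀ (node : List Int) (seen : Finset (Int × Int)), seen ⊆ (dfsA maze dest f node seen).2) :
    ∀ (ds : List (Int × Int)) (x y : Int) (seen : Finset (Int × Int)),
      seen ⊆ (tryDirsA maze dest f ds x y seen).2 := by
  intro ds
  induction ds with
  | nil => intro x y seen; simp [tryDirsA]
  | cons d ds ih =>
    intro x y seen
    obtain ⟨dx, dy⟩ := d
    simp only [tryDirsA]
    split
    · exact h _ _
    · exact (h _ _).trans (ih _ _ _)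

theorem dfsA_grow (maze : List (List Int)) (dest : List Int) :
    ∀ (f : Nat) (node : List Int) (seen : Finset (Int × Int)), seen ⊆ (dfsA maze dest f node seen).2 := by
  intro f
  induction f with
  | zero => intro node seen; simp [dfsA]
  | succ f ih =>
    intro node seen
    simp only [dfsA]
    split
    · exact subset_rfl
    · cases hp : pvPair node with
      | none => simp
      | some p =>
        obtain ⟨x, y⟩ := p
        simp only
        split
        · exact subset_rfl
        · exact (Finset.subset_insert _ _).trans (tryDirsA_grow_of maze dest f ih _ _ _ _)

-- seen stays inside the universe U
theorem tryDirsA_subU_of (maze : List (List Int)) (dest : List Int) (U : Finset (Int × Int)) (f : Nat)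
    (hcl : ∀ (x y dx dy : Int), (x, y) ∈ U → pvRoll maze dx dy (maze.length + (maze.headI).length + 2) x y ∈ U)
    (h : ∀ (node : List Int) (seen : Finset (Int × Int)), seen ⊆ U →
      (∀ x y : Int, node = [x, y] → (x, y) ∈ U) → (dfsA maze dest f node seen).2 ⊆ U) :
    ∀ (ds : List (Int × Int)) (x y : Int) (seen : Finset (Int × Int)),
      seen ⊆ U → (x, y) ∈ U → (tryDirsA maze dest f ds x y seen).2 ⊆ U := by
  intro ds
  induction ds with
  | nil => intro x y seen hs _; simpa [tryDirsA] using hs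
  | cons d ds ih =>
    intro x y seen hs hxy
    obtain ⟨dx, dy⟩ := d
    have hsucc : (dfsA maze dest f
        [(pvRoll maze dx dy (maze.length + (maze.headI).length + 2) x y).1,
         (pvRoll maze dx dy (maze.length + (maze.headI).length + 2) x y).2] seen).2 ⊆ U := by
      refine h _ _ hs ?_
      intro a b hab
      have h1 : a = (pvRoll maze dx dy (maze.length + (maze.headI).length + 2) x y).1 := by
        simpa using (congrArg (fun l => l.headI) hab).symm
      have h2 : b = (pvRoll maze dx dy (maze.length + (maze.headI).length + 2) x y).2 := by
        simpa using (congrArg (fun l => l.tail.headI) hab).symm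
      rw [h1, h2]
      exact hcl x y dx dy hxy
    simp only [tryDirsA]
    split
    · exact hsucc
    · exact ih _ _ _ hsucc hxy

theorem dfsA_subU (maze : List (List Int)) (dest : List Int) (U : Finset (Int × Int))
    (hcl : ∀ (x y dx dy : Int), (x, y) ∈ U → pvRoll maze dx dy (maze.length + (maze.headI).length + 2) x y ∈ U) :
    ∀ (f : Nat) (node : List Int) (seen : Finset (Int × Int)), seen ⊆ U →
      (∀ x y : Int, node = [x, y] → (x, y) ∈ U) → (dfsA maze dest f node seen).2 ⊆ U := by
  intro f
  induction f with
  | zero => intro node seen hs _; simpa [dfsA] using hs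
  | succ f ih =>
    intro node seen hs hn
    simp only [dfsA]
    split
    · exact hs
    · cases hp : pvPair node with
      | none => simpa using hs
      | some p =>
        obtain ⟨x, y⟩ := p
        have hxy : (x, y) ∈ U := by
          apply hn
          cases node with
          | nil => simp [pvPair] at hp
          | cons a t =>
            cases t with
            | nil => simp [pvPair] at hp
            | cons b t2 =>
              cases t2 with
              | nil => simp [pvPair] at hp; rw [hp.1, hp.2]
              | cons c t3 => simp [pvPair] at hp
        simp only
        split
        · exact hs
        · exact tryDirsA_subU_of maze dest U f hcl ih _ _ _ _ (Finset.insert_subset hxy hs) hxy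

theorem node_hyp_of_mem (U : Finset (Int × Int)) (p : Int × Int) (hp : p ∈ U) :
    ∀ a b : Int, [p.1, p.2] = [a, b] → (a, b) ∈ U := by
  intro a b h
  simp only [List.cons.injEq, and_true] at h
  obtain ⟨h1, h2⟩ := h
  rw [← h1, ← h2]
  simpa using hp

-- fuel irrelevance: any fuel above the number of still-unmarked universe cells gives the same result
theorem tryDirsA_FI_of (maze : List (List Int)) (dest : List Int) (U : Finset (Int × Int)) (f g : Nat)
    (hcl : ∀ (x y dx dy : Int), (x, y) ∈ U → pvRoll maze dx dy (maze.length + (maze.headI).length + 2) x y ∈ U)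
    (hdfs : ∀ (g' : Nat) (node : List Int) (seen : Finset (Int × Int)), seen ⊆ U →
      (∀ x y : Int, node = [x, y] → (x, y) ∈ U) →
      U.card - seen.card < f → U.card - seen.card < g' →
      dfsA maze dest f node seen = dfsA maze dest g' node seen) :
    ∀ (ds : List (Int × Int)) (x y : Int) (seen : Finset (Int × Int)), seen ⊆ U → (x, y) ∈ U →
      U.card - seen.card < f → U.card - seen.card < g →
      tryDirsA maze dest f ds x y seen = tryDirsA maze dest g ds x y seen := by
  intro ds
  induction ds with
  | nil => intro x y seen _ _ _ _; simp [tryDirsA]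
  | cons d ds ih =>
    intro x y seen hs hxy hf hg
    obtain ⟨dx, dy⟩ := d
    have hmem : pvRoll maze dx dy (maze.length + (maze.headI).length + 2) x y ∈ U := hcl x y dx dy hxy
    have heq : dfsA maze dest f
        [(pvRoll maze dx dy (maze.length + (maze.headI).length + 2) x y).1,
         (pvRoll maze dx dy (maze.length + (maze.headI).length + 2) x y).2] seen =
        dfsA maze dest g
        [(pvRoll maze dx dy (maze.length + (maze.headI).length + 2) x y).1,
         (pvRoll maze dx dy (maze.length + (maze.headI).length + 2) x y).2] seen :=
      hdfs g _ seen hs (node_hyp_of_mem U _ hmem) hf hg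
    simp only [tryDirsA, ← heq]
    split
    · rfl
    · apply ih
      · exact dfsA_subU maze dest U hcl f _ seen hs (node_hyp_of_mem U _ hmem)
      · exact hxy
      · have := Finset.card_le_card (dfsA_grow maze dest f
          [(pvRoll maze dx dy (maze.length + (maze.headI).length + 2) x y).1,
           (pvRoll maze dx dy (maze.length + (maze.headI).length + 2) x y).2] seen)
        omega
      · have := Finset.card_le_card (dfsA_grow maze dest f
          [(pvRoll maze dx dy (maze.length + (maze.headI).length + 2) x y).1,
           (pvRoll maze dx dy (maze.length + (maze.headI).length + 2) x y).2] seen)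
        omega

theorem dfsA_FI (maze : List (List Int)) (dest : List Int) (U : Finset (Int × Int))
    (hcl : ∀ (x y dx dy : Int), (x, y) ∈ U → pvRoll maze dx dy (maze.length + (maze.headI).length + 2) x y ∈ U) :
    ∀ (f g : Nat) (node : List Int) (seen : Finset (Int × Int)), seen ⊆ U →
      (∀ x y : Int, node = [x, y] → (x, y) ∈ U) →
      U.card - seen.card < f → U.card - seen.card < g →
      dfsA maze dest f node seen = dfsA maze dest g node seen := by
  intro f
  induction f with
  | zero => intro g node seen _ _ hf _; omega
  | succ f ih =>
    intro g node seen hs hn hf hg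
    cases g with
    | zero => omega
    | succ g =>
      simp only [dfsA]
      split
      · rfl
      · cases hp : pvPair node with
        | none => rfl
        | some p =>
          obtain ⟨x, y⟩ := p
          have hxy : (x, y) ∈ U := by
            apply hn
            cases node with
            | nil => simp [pvPair] at hp
            | cons a t =>
              cases t with
              | nil => simp [pvPair] at hp
              | cons b t2 =>
                cases t2 with
                | nil => simp [pvPair] at hp; rw [hp.1, hp.2]
                | cons c t3 => simp [pvPair] at hp
          simp only
          split
          · rfl
          · rename_i hnm
            have hcard : (insert (x, y) seen).card = seen.card + 1 :=
              Finset.card_insert_of_notMem hnm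
            have hle : (insert (x, y) seen).card ≤ U.card :=
              Finset.card_le_card (Finset.insert_subset hxy hs)
            apply tryDirsA_FI_of maze dest U f g hcl ih
            · exact Finset.insert_subset hxy hs
            · exact hxy
            · omega
            · omega

-- reference semantics of the stack machine: fold A's dfs over the frames
def frameFold (maze : List (List Int)) (dest : List Int) (F : Nat) :
    List (Int × Int) → Finset (Int × Int) → Bool × Finset (Int × Int)
  | [], seen => (false, seen)
  | (x, y) :: fr, seen =>
    let r := dfsA maze dest F [x, y] seen
    if r.1 then (true, r.2) else frameFold maze dest F fr r.2

def stackRun (maze : List (List Int)) (dest : List Int) (F : Nat) :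
    List (List (Int × Int)) → Finset (Int × Int) → Bool
  | [], _ => false
  | fr :: rest, seen =>
    let r := frameFold maze dest F fr seen
    if r.1 then true else stackRun maze dest F rest r.2

-- one level of A's direction loop is the frame fold over the four rolled-to stops
theorem tryDirsA_eq_frameFold (maze : List (List Int)) (dest : List Int) (U : Finset (Int × Int)) (F : Nat)
    (hcl : ∀ (x y dx dy : Int), (x, y) ∈ U → pvRoll maze dx dy (maze.length + (maze.headI).length + 2) x y ∈ U)
    (hF : U.card < F) :
    ∀ (ds : List (Int × Int)) (f : Nat) (x y : Int) (seen : Finset (Int × Int)), seen ⊆ U → (x, y) ∈ U →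
      U.card - seen.card < f →
      tryDirsA maze dest f ds x y seen =
        frameFold maze dest F
          (ds.map (fun d => pvRoll maze d.1 d.2 (maze.length + (maze.headI).length + 2) x y)) seen := by
  intro ds
  induction ds with
  | nil => intro f x y seen _ _ _; simp [tryDirsA, frameFold]
  | cons d ds ih =>
    intro f x y seen hs hxy hf
    obtain ⟨dx, dy⟩ := d
    have hmem : pvRoll maze dx dy (maze.length + (maze.headI).length + 2) x y ∈ U := hcl x y dx dy hxy
    have heq : dfsA maze dest f
        [(pvRoll maze dx dy (maze.length + (maze.headI).length + 2) x y).1,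
         (pvRoll maze dx dy (maze.length + (maze.headI).length + 2) x y).2] seen =
        dfsA maze dest F
        [(pvRoll maze dx dy (maze.length + (maze.headI).length + 2) x y).1,
         (pvRoll maze dx dy (maze.length + (maze.headI).length + 2) x y).2] seen :=
      dfsA_FI maze dest U hcl f F _ seen hs (node_hyp_of_mem U _ hmem) hf (by omega)
    rcases hroll : pvRoll maze dx dy (maze.length + (maze.headI).length + 2) x y with ⟨sx, sy⟩
    rw [hroll] at heq
    simp only [tryDirsA, frameFold, List.map_cons, hroll, ← heq]
    split
    · rfl
    · apply ih
      · exact dfsA_subU maze dest U hcl f _ seen hs (node_hyp_of_mem U (sx, sy) (hroll ▸ hmem))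
      · exact hxy
      · have := Finset.card_le_card (dfsA_grow maze dest f [sx, sy] seen)
        omega

-- the simulation invariant's potential
def pvPhi (U : Finset (Int × Int)) (stack : List (List (Int × Int))) (seen : Finset (Int × Int)) : Nat :=
  (stack.map List.length).sum + stack.length + 5 * (U.card - seen.card)

theorem frameFold_cons (maze : List (List Int)) (dest : List Int) (F : Nat) (x y : Int)
    (fr : List (Int × Int)) (seen : Finset (Int × Int)) :
    frameFold maze dest F ((x, y) :: fr) seen =
      if (dfsA maze dest F [x, y] seen).1 then (true, (dfsA maze dest F [x, y] seen).2)
      else frameFold maze dest F fr (dfsA maze dest F [x, y] seen).2 := rfl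

theorem stackRun_cons (maze : List (List Int)) (dest : List Int) (F : Nat)
    (fr : List (Int × Int)) (rest : List (List (Int × Int))) (seen : Finset (Int × Int)) :
    stackRun maze dest F (fr :: rest) seen =
      if (frameFold maze dest F fr seen).1 then true
      else stackRun maze dest F rest (frameFold maze dest F fr seen).2 := rfl

theorem machineB_eq_stackRun (maze : List (List Int)) (dest : List Int) (U : Finset (Int × Int)) (F : Nat)
    (hcl : ∀ (x y dx dy : Int), (x, y) ∈ U → pvRoll maze dx dy (maze.length + (maze.headI).length + 2) x y ∈ U)
    (hF : U.card < F) :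
    ∀ (fM : Nat) (stack : List (List (Int × Int))) (seen : Finset (Int × Int)), seen ⊆ U →
      (∀ fr ∈ stack, ∀ p ∈ fr, p ∈ U) → pvPhi U stack seen < fM →
      machineB maze dest fM stack seen = stackRun maze dest F stack seen := by
  obtain ⟨F', rfl⟩ : ∃ F'', F = F'' + 1 := ⟨F - 1, by omega⟩
  intro fM
  induction fM with
  | zero => intro stack seen _ _ hphi; omega
  | succ fM ih =>
    intro stack seen hs hstk hphi
    cases stack with
    | nil => simp [machineB, stackRun]
    | cons fr rest =>
      cases fr with
      | nil =>
        simp only [machineB]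
        rw [ih rest seen hs (fun fr h => hstk fr (List.mem_cons_of_mem _ h))
          (by simp [pvPhi] at hphi ⊢; omega), stackRun_cons]
        simp [frameFold]
      | cons p fr =>
        obtain ⟨x, y⟩ := p
        have hxy : (x, y) ∈ U := hstk _ List.mem_cons_self _ List.mem_cons_self
        simp only [machineB]
        split
        · rename_i hdest
          -- destination hit: both sides true
          have hd : dfsA maze dest (F' + 1) [x, y] seen = (true, seen) := by
            simp only [dfsA, if_pos hdest]
          rw [stackRun_cons, frameFold_cons, hd]
          simp
        · rename_i hdest
          split
          · rename_i hmemseen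
            -- already seen: dfs returns (false, seen) and the frame continues
            rw [ih (fr :: rest) seen hs ?_ ?_]
            · have hd : dfsA maze dest (F' + 1) [x, y] seen = (false, seen) := by
                simp only [dfsA, if_neg hdest, pvPair]
                simp only [if_pos hmemseen]
              rw [stackRun_cons, stackRun_cons, frameFold_cons, hd]
              simp
            · intro fr' h' q hq
              rcases List.mem_cons.mp h' with h'' | h''
              · exact hstk _ List.mem_cons_self q (by rw [h''] at hq; exact List.mem_cons_of_mem _ hq)
              · exact hstk fr' (List.mem_cons_of_mem _ h'') q hq
            · simp [pvPhi] at hphi ⊢; omega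
          · rename_i hmemseen
            -- expand: push the four stops, mark (x, y)
            have hins : insert (x, y) seen ⊆ U := Finset.insert_subset hxy hs
            have hcard : (insert (x, y) seen).card = seen.card + 1 :=
              Finset.card_insert_of_notMem hmemseen
            have hle : (insert (x, y) seen).card ≤ U.card := Finset.card_le_card hins
            rw [ih _ _ hins ?inv ?phi]
            case inv =>
              intro fr' h' q hq
              rcases List.mem_cons.mp h' with h'' | h''
              · subst h''
                simp only [List.mem_map] at hq
                obtain ⟨d, _, hd⟩ := hq
                rw [← hd]
                exact hcl x y d.1 d.2 hxy
              · rcases List.mem_cons.mp h'' with h3 | h3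
                · exact hstk _ List.mem_cons_self q (by rw [h3] at hq; exact List.mem_cons_of_mem _ hq)
                · exact hstk fr' (List.mem_cons_of_mem _ h3) q hq
            case phi => simp [pvPhi] at hphi ⊢; omega
            -- now identify the two stackRun values
            have hstep : dfsA maze dest (F' + 1) [x, y] seen =
                frameFold maze dest (F' + 1)
                  ([((-1 : Int), (0 : Int)), (1, 0), (0, -1), (0, 1)].map
                    (fun d => pvRoll maze d.1 d.2 (maze.length + (maze.headI).length + 2) x y))
                  (insert (x, y) seen) := by
              simp only [dfsA, if_neg hdest, pvPair]
              simp only [if_neg hmemseen]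
              exact tryDirsA_eq_frameFold maze dest U (F' + 1) hcl hF _ F' x y _ hins hxy (by omega)
            rcases hq : frameFold maze dest (F' + 1)
                ([((-1 : Int), (0 : Int)), (1, 0), (0, -1), (0, 1)].map
                  (fun d => pvRoll maze d.1 d.2 (maze.length + (maze.headI).length + 2) x y))
                (insert (x, y) seen) with ⟨b, s⟩
            have hfc : frameFold maze dest (F' + 1) ((x, y) :: fr) seen =
                if b then (true, s) else frameFold maze dest (F' + 1) fr s := by
              rw [frameFold_cons, hstep, hq]
            conv_rhs => rw [stackRun_cons]
            rw [hfc, stackRun_cons, hq]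
            cases b
            · simp [stackRun_cons]
            · simp

theorem hasPath_main : ∀ (maze : List (List Int)) (src : List Int) (dest : List Int), Pre_hasPath maze src dest → hasPath maze src dest = hasPath_alt maze src dest := by
  intro maze src dest hpre
  obtain ⟨hsrc, _⟩ := hpre
  by_cases h : src = dest
  · unfold hasPath hasPath_alt
    rw [if_pos h]
    obtain ⟨k, hk⟩ : ∃ k, maze.length * (maze.headI).length + 3 = k + 1 :=
      ⟨maze.length * (maze.headI).length + 2, rfl⟩
    rw [hk]
    simp [dfsA, h]
  · have hlen : src.length = 2 := by
      rcases hsrc with h' | h'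
      · exact absurd h' h
      · exact h'
    obtain ⟨x0, y0, rfl⟩ : ∃ a b : Int, src = [a, b] := by
      rcases src with _ | ⟨a, t⟩
      · simp at hlen
      · rcases t with _ | ⟨b, t2⟩
        · simp at hlen
        · rcases t2 with _ | ⟨c, t3⟩
          · exact ⟨a, b, rfl⟩
          · simp at hlen
    have hcl : ∀ (x y dx dy : Int), (x, y) ∈ insert (x0, y0) (pvGrid maze) →
        pvRoll maze dx dy (maze.length + (maze.headI).length + 2) x y ∈ insert (x0, y0) (pvGrid maze) := by
      intro x y dx dy hxy
      rcases pvRoll_mem maze dx dy (maze.length + (maze.headI).length + 2) x y with hr | hr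
      · rw [hr]; exact hxy
      · exact Finset.mem_insert_of_mem hr
    have hcard : (insert (x0, y0) (pvGrid maze)).card ≤ maze.length * (maze.headI).length + 1 := by
      have h1 := Finset.card_insert_le (x0, y0) (pvGrid maze)
      have h2 := pvGrid_card maze
      omega
    unfold hasPath hasPath_alt
    rw [if_neg h]
    simp only [pvPair]
    rw [machineB_eq_stackRun maze dest (insert (x0, y0) (pvGrid maze))
      (maze.length * (maze.headI).length + 3) hcl (by omega) _ _ _
      (Finset.empty_subset _) ?inv ?phi]
    case inv =>
      intro fr hfr p hp
      rcases List.mem_singleton.mp hfr with rfl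
      rcases List.mem_singleton.mp hp with rfl
      exact Finset.mem_insert_self _ _
    case phi =>
      simp only [pvPhi, List.map_cons, List.map_nil, List.sum_cons, List.sum_nil,
        List.length_cons, List.length_nil, Finset.card_empty]
      omega
    rw [stackRun_cons, frameFold_cons]
    rcases dfsA maze dest (maze.length * (maze.headI).length + 3) [x0, y0] ∅ with ⟨b, sn⟩
    cases b <;> simp [stackRun, frameFold]

-- ===== VERDICT (by name: the statement is the Claim_ definition above) =====
theorem hasPath_spec : Claim_equal_hasPath := by
  intro maze src dest _ hpre
  exact hasPath_main maze src dest hpre
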